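-- pv_equiv track=rewrite | github.com/ldf97/DNA-analysis-tool | pages/Plot Nucleotide Frequency.py | amino_acid_type_frequency
-- ===== SOURCE A (Python) =====
-- def amino_acid_type_frequency(amino_acid_list):
--   """
--   Count the amino acids in a given class.
--   Return a counts for each type in this order: polar uncharged side chain, charged side chain,
--   positively charged side chain, negatively charged side chain, special cases, hydrophobic side chains
--   """
--   tmp_amino_acids_charged_side_chains_dict = {'Arginine, Arg, R': 0, 'Histidine, His, H': 0, 'Lysine, Lys, K': 0, 'Aspartic Acid, Asp, D': 0, 'Glutamic Acid, Glut, E':0}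
--   tmp_amino_acids_positively_charged_dict = {'Arginine, Arg, R':0, 'Histidine, His, H':0, 'Lysine, Lys, K':0}
--   tmp_amino_acids_negatively_charged_dict = {'Aspartic Acid, Asp, D':0, 'Glutamic Acid, Glut, E':0}
--   tmp_amino_acids_with_polar_uncharged_side_chains_dict = {'Serine, Ser, S':0, 'Threonine, Thr, T':0, 'Asparagine, Asn, N':0, 'Glutamine, Gln, Q':0}
--   tmp_amino_acids_special_cases_dict = {'Cysteine, Cys, C':0, 'Glycine, Gly, G':0, 'Proline, Pro, P':0}
--   tmp_amino_acids_with_hydrophobic_side_chains_dict = {'Alanine, Ala, A':0, 'Valine, Val, V':0, 'Isoleucine, Ile, I':0, 'Leucine, Leu, L':0, 'Methionine, Met, M':0,'Phenylalanine, Phe, F':0,'Tyrosine, Tyr, Y':0,'Tryptophan, Trp, W':0}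
--   for amino in amino_acid_list:
--     if amino in tmp_amino_acids_with_polar_uncharged_side_chains_dict:
--       tmp_amino_acids_with_polar_uncharged_side_chains_dict[amino] += 1
--     if amino in tmp_amino_acids_charged_side_chains_dict:
--       tmp_amino_acids_charged_side_chains_dict[amino] += 1
--     if amino in tmp_amino_acids_positively_charged_dict:
--       tmp_amino_acids_positively_charged_dict[amino] += 1
--     if amino in tmp_amino_acids_negatively_charged_dict:
--       tmp_amino_acids_negatively_charged_dict[amino] += 1
--     if amino in tmp_amino_acids_special_cases_dict:
--       tmp_amino_acids_special_cases_dict[amino] += 1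
--     if amino in tmp_amino_acids_with_hydrophobic_side_chains_dict:
--       tmp_amino_acids_with_hydrophobic_side_chains_dict[amino] += 1
--
--
--   return sum(tmp_amino_acids_with_polar_uncharged_side_chains_dict.values()),\
--   sum(tmp_amino_acids_charged_side_chains_dict.values()),\
--   sum(tmp_amino_acids_positively_charged_dict.values()),\
--   sum(tmp_amino_acids_negatively_charged_dict.values()),\
--   sum(tmp_amino_acids_special_cases_dict.values()),\
--   sum(tmp_amino_acids_with_hydrophobic_side_chains_dict.values())
-- ===== SOURCE B (Python) =====
-- POLAR = ('Serine, Ser, S', 'Threonine, Thr, T', 'Asparagine, Asn, N', 'Glutamine, Gln, Q')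
-- POSITIVE = ('Arginine, Arg, R', 'Histidine, His, H', 'Lysine, Lys, K')
-- NEGATIVE = ('Aspartic Acid, Asp, D', 'Glutamic Acid, Glut, E')
-- CHARGED = POSITIVE + NEGATIVE
-- SPECIAL = ('Cysteine, Cys, C', 'Glycine, Gly, G', 'Proline, Pro, P')
-- HYDROPHOBIC = ('Alanine, Ala, A', 'Valine, Val, V', 'Isoleucine, Ile, I', 'Leucine, Leu, L',
--                'Methionine, Met, M', 'Phenylalanine, Phe, F', 'Tyrosine, Tyr, Y', 'Tryptophan, Trp, W')
--
-- def amino_acid_type_frequency(amino_acid_list):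
--   # one frequency pass, then fixed-size sums per class (charged = positive + negative)
--   freq = {}
--   for amino in amino_acid_list:
--     freq[amino] = freq.get(amino, 0) + 1
--   def total(names):
--     return sum(freq.get(a, 0) for a in names)
--   return (total(POLAR), total(CHARGED), total(POSITIVE),
--           total(NEGATIVE), total(SPECIAL), total(HYDROPHOBIC))
-- ===== Notes on version B (the rewrite author's own statement) =====
-- stated objective: simpler
-- what changed: Replaces A's six zero-initialised dicts mutated via six membership tests per element with a single frequency-dict pass over the input followed by fixed-size sums over the six literal class member lists (charged = positive + negative).
import Mathlib
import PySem

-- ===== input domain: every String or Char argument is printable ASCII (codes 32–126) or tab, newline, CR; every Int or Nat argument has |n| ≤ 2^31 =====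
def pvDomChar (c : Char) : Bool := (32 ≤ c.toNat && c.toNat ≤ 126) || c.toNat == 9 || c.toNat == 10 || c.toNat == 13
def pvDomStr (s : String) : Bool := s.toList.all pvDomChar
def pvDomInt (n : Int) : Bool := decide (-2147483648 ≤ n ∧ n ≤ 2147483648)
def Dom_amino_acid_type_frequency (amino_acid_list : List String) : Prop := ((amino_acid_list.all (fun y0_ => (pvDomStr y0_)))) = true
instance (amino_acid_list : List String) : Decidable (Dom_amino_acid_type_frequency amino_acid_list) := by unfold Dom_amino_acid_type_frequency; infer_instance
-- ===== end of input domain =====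

-- B replaces A's six mutable zero-initialised dicts with six membership tests per element
-- by one frequency pass and fixed-size per-class sums (simpler; same asymptotic cost).

-- ===== PORT A =====
-- A's six zero-initialised literal dicts
def pvD_charged : PySem.Dict String Int := PySem.Dict.ofList
  [("Arginine, Arg, R", 0), ("Histidine, His, H", 0), ("Lysine, Lys, K", 0),
   ("Aspartic Acid, Asp, D", 0), ("Glutamic Acid, Glut, E", 0)]
def pvD_positive : PySem.Dict String Int := PySem.Dict.ofList
  [("Arginine, Arg, R", 0), ("Histidine, His, H", 0), ("Lysine, Lys, K", 0)]
def pvD_negative : PySem.Dict String Int := PySem.Dict.ofList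
  [("Aspartic Acid, Asp, D", 0), ("Glutamic Acid, Glut, E", 0)]
def pvD_polar : PySem.Dict String Int := PySem.Dict.ofList
  [("Serine, Ser, S", 0), ("Threonine, Thr, T", 0), ("Asparagine, Asn, N", 0), ("Glutamine, Gln, Q", 0)]
def pvD_special : PySem.Dict String Int := PySem.Dict.ofList
  [("Cysteine, Cys, C", 0), ("Glycine, Gly, G", 0), ("Proline, Pro, P", 0)]
def pvD_hydro : PySem.Dict String Int := PySem.Dict.ofList
  [("Alanine, Ala, A", 0), ("Valine, Val, V", 0), ("Isoleucine, Ile, I", 0), ("Leucine, Leu, L", 0),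
   ("Methionine, Met, M", 0), ("Phenylalanine, Phe, F", 0), ("Tyrosine, Tyr, Y", 0), ("Tryptophan, Trp, W", 0)]

-- the loop body: 'if amino in d: d[amino] += 1', applied to each of the six dicts in turn
def pvStep (d : PySem.Dict String Int) (amino : String) : PySem.Dict String Int :=
  if d.contains amino then d.modify amino 0 (· + 1) else d

def amino_acid_type_frequency (amino_acid_list : List String) : Int × Int × Int × Int × Int × Int :=
  let final := amino_acid_list.foldl
    (fun (s : PySem.Dict String Int × PySem.Dict String Int × PySem.Dict String Int ×
              PySem.Dict String Int × PySem.Dict String Int × PySem.Dict String Int) amino =>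
      (pvStep s.1 amino, pvStep s.2.1 amino, pvStep s.2.2.1 amino,
       pvStep s.2.2.2.1 amino, pvStep s.2.2.2.2.1 amino, pvStep s.2.2.2.2.2 amino))
    (pvD_polar, pvD_charged, pvD_positive, pvD_negative, pvD_special, pvD_hydro)
  (final.1.values.sum, final.2.1.values.sum, final.2.2.1.values.sum,
   final.2.2.2.1.values.sum, final.2.2.2.2.1.values.sum, final.2.2.2.2.2.values.sum)

-- ===== PORT B =====
def pvPOLAR : List String := ["Serine, Ser, S", "Threonine, Thr, T", "Asparagine, Asn, N", "Glutamine, Gln, Q"]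
def pvPOSITIVE : List String := ["Arginine, Arg, R", "Histidine, His, H", "Lysine, Lys, K"]
def pvNEGATIVE : List String := ["Aspartic Acid, Asp, D", "Glutamic Acid, Glut, E"]
def pvCHARGED : List String := pvPOSITIVE ++ pvNEGATIVE
def pvSPECIAL : List String := ["Cysteine, Cys, C", "Glycine, Gly, G", "Proline, Pro, P"]
def pvHYDROPHOBIC : List String :=
  ["Alanine, Ala, A", "Valine, Val, V", "Isoleucine, Ile, I", "Leucine, Leu, L",
   "Methionine, Met, M", "Phenylalanine, Phe, F", "Tyrosine, Tyr, Y", "Tryptophan, Trp, W"]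

def amino_acid_type_frequency_alt (amino_acid_list : List String) : Int × Int × Int × Int × Int × Int :=
  let freq : PySem.Dict String Int :=
    amino_acid_list.foldl (fun d a => d.insert a (d.getD a 0 + 1)) PySem.Dict.empty
  let total : List String → Int := fun names => (names.map (fun a => freq.getD a 0)).sum
  (total pvPOLAR, total pvCHARGED, total pvPOSITIVE, total pvNEGATIVE, total pvSPECIAL, total pvHYDROPHOBIC)

-- ===== PRECONDITION & SPEC =====
def Spec_amino_acid_type_frequency (amino_acid_list : List String) (out : Int × Int × Int × Int × Int × Int) : Prop := out = amino_acid_type_frequency_alt amino_acid_list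
instance (amino_acid_list : List String) (out : Int × Int × Int × Int × Int × Int) : Decidable (Spec_amino_acid_type_frequency amino_acid_list out) := by unfold Spec_amino_acid_type_frequency; infer_instance

-- ===== CLAIM (what is proved, stated in full; the proofs are below) =====
def Claim_equal_amino_acid_type_frequency : Prop := ∀ (amino_acid_list : List String), Dom_amino_acid_type_frequency amino_acid_list → Spec_amino_acid_type_frequency amino_acid_list (amino_acid_type_frequency amino_acid_list)

-- ===== LEMMAS AND PROOFS =====

-- A's six-dict fold is the tuple of six independent folds
theorem pvFold6 (l : List String)
    (s : PySem.Dict String Int × PySem.Dict String Int × PySem.Dict String Int ×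
         PySem.Dict String Int × PySem.Dict String Int × PySem.Dict String Int) :
    l.foldl
      (fun s amino =>
        (pvStep s.1 amino, pvStep s.2.1 amino, pvStep s.2.2.1 amino,
         pvStep s.2.2.2.1 amino, pvStep s.2.2.2.2.1 amino, pvStep s.2.2.2.2.2 amino)) s
    = (l.foldl pvStep s.1, l.foldl pvStep s.2.1, l.foldl pvStep s.2.2.1,
       l.foldl pvStep s.2.2.2.1, l.foldl pvStep s.2.2.2.2.1, l.foldl pvStep s.2.2.2.2.2) := by
  induction l generalizing s with
  | nil => rfl
  | cons a t ih => simp only [List.foldl_cons, ih]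

theorem pvStep_contains (d : PySem.Dict String Int) (a k : String) :
    (pvStep d a).contains k = d.contains k := by
  unfold pvStep
  split
  · rename_i h
    rw [PySem.Dict.contains_modify]
    by_cases hk : k = a
    · subst hk; simp [h]
    · simp [hk]
  · rfl

theorem pvFoldA_getD (l : List String) (d : PySem.Dict String Int) (k : String) :
    (l.foldl pvStep d).getD k 0
      = d.getD k 0 + (if d.contains k then (l.count k : Int) else 0) := by
  induction l generalizing d with
  | nil => simp
  | cons a t ih =>
    rw [List.foldl_cons, ih, pvStep_contains]
    by_cases hk : d.contains k
    · simp only [hk, if_true]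
      by_cases hka : k = a
      · subst hka
        unfold pvStep
        simp only [hk, if_true, PySem.Dict.getD_modify_self, List.count_cons_self]
        push_cast; ring
      · have hak : ¬a = k := fun h => hka h.symm
        unfold pvStep
        split
        · rw [PySem.Dict.getD_modify_of_ne _ _ _ hka]
          simp [hak]
        · simp [hak]
    · simp only [hk]
      unfold pvStep
      split
      · rename_i h
        have hka : k ≠ a := by rintro rfl; rw [h] at hk; exact hk rfl
        rw [PySem.Dict.getD_modify_of_ne _ _ _ hka]
        simp
      · simp

-- keys of A's fold never change (pvStep only touches existing keys)
theorem pvFoldA_keys (l : List String) (d : PySem.Dict String Int) :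
    (l.foldl pvStep d).keys = d.keys := by
  induction l generalizing d with
  | nil => rfl
  | cons a t ih =>
    rw [List.foldl_cons, ih]
    unfold pvStep
    split
    · rename_i h
      rw [PySem.Dict.keys_modify, PySem.Dict.keys_insert_of_contains _ _ h]
    · rfl

-- A's per-dict total: sum of values after the loop = per-key counts of the input
theorem pvSumA (l : List String) (d : PySem.Dict String Int)
    (hnd : d.keys.Nodup)
    (hall : ∀ k ∈ d.keys, d.getD k 0 = 0 ∧ d.contains k = true) :
    (l.foldl pvStep d).values.sum = (d.keys.map (fun k => (l.count k : Int))).sum := by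
  rw [PySem.Dict.values_eq_map_keys _ (by rw [pvFoldA_keys]; exact hnd) 0, pvFoldA_keys]
  congr 1
  apply List.map_congr_left
  intro k hk
  obtain ⟨h0, hc⟩ := hall k hk
  rw [pvFoldA_getD, h0, hc]
  simp

-- B's per-class total over any name list is the same per-key count sum
theorem pvSumB (l : List String) (names : List String) :
    (names.map (fun a =>
        (l.foldl (fun d a => d.insert a (d.getD a 0 + 1)) PySem.Dict.empty).getD a 0)).sum
      = (names.map (fun k => (l.count k : Int))).sum := by
  congr 1
  apply List.map_congr_left
  intro a _
  rw [PySem.Dict.getD_foldl_insert_add_one]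
  simp

-- ===== VERDICT (by name: the statement is the Claim_ definition above) =====
theorem amino_acid_type_frequency_spec : Claim_equal_amino_acid_type_frequency := by
  intro l _
  unfold Spec_amino_acid_type_frequency amino_acid_type_frequency amino_acid_type_frequency_alt
  simp only [pvFold6]
  refine Prod.ext ?_ (Prod.ext ?_ (Prod.ext ?_ (Prod.ext ?_ (Prod.ext ?_ ?_)))) <;>
    simp only [] <;>
    rw [pvSumA l _ (by decide) (by decide), pvSumB] <;>
    rfl
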